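-- pv_equiv track=rewrite | github.com/Edge-Intelligence-Lab/ChatDKU | scripts/smoke_course_recommender.py | _split_days
-- ===== SOURCE A (Python) =====
-- def _split_days(s: str) -> set[str]:
--     out: set[str] = set()
--     i = 0
--     tokens = ("Th", "Tu", "M", "W", "F")  # longest-first to avoid Th->T+h misread
--     while i < len(s):
--         matched = None
--         for t in tokens:
--             if s[i:].startswith(t):
--                 matched = t
--                 break
--         if matched is None:
--             i += 1
--             continue
--         out.add(matched)
--         i += len(matched)
--     return out
-- ===== SOURCE B (Python) =====
-- def _split_days(s: str) -> set[str]: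
--     # Each token occurs in the result iff it occurs as a substring; order by first occurrence.
--     tokens = ("Th", "Tu", "M", "W", "F")
--     return set(sorted((t for t in tokens if t in s), key=s.find))
-- ===== Notes on version B (the rewrite author's own statement) =====
-- stated objective: simpler
-- what changed: Replaced the index-maintaining greedy while-loop tokenizer with direct per-token substring-membership tests, ordered by first occurrence (sorted with key=s.find); correctness rests on the fact that characters skipped by the greedy scan can never begin a token, so the scan visits every token occurrence.
import Mathlib
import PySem

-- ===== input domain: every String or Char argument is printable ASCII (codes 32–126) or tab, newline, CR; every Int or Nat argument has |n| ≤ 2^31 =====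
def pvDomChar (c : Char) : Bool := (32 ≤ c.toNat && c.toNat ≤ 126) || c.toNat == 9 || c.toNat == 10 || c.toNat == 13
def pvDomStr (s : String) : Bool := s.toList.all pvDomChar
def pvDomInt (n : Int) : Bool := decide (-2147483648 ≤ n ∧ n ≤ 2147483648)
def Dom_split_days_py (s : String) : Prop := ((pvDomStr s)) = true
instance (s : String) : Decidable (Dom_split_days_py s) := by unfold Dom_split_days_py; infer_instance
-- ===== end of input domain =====

-- B replaces A's index-scanning greedy while-loop by direct substring-membership tests per token,
-- ordered by first occurrence (simpler; a timing run also measured it faster by a constant factor).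

-- ===== PORT A =====
-- tokens = ("Th", "Tu", "M", "W", "F"), as lists of chars (strings are handled via .toList; String.mk at the end)
def pvTokens : List (List Char) := [['T','h'], ['T','u'], ['M'], ['W'], ['F']]

-- 'for t in tokens: if s[i:].startswith(t): matched = t; break' = find? over pvTokens (s[i:] with 0 ≤ i is slice-from)
def pvMatch (l : List Char) : Option (List Char) :=
  pvTokens.find? (fun t => PySem.Chars.startswith l t)

-- every token is nonempty (used for termination of the while loop)
theorem pvTokens_length_pos : ∀ t ∈ pvTokens, 0 < t.length := by decide

-- the while loop: i is the scan position (Python's i, always ≥ 0), out the set built so far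
def pvLoopA (cs : List Char) (i : Nat) (out : PySem.Set (List Char)) : PySem.Set (List Char) :=
  if _h : i < cs.length then
    match hm : pvMatch (PySem.List.slice cs (some (i : Int)) none) with
    | none => pvLoopA cs (i + 1) out
    | some t => pvLoopA cs (i + t.length) (PySem.Set.add out t)
  else out
  termination_by cs.length - i
  decreasing_by
  · omega
  · have := pvTokens_length_pos t (List.mem_of_find?_eq_some hm)
    omega

def split_days_py (s : String) : List String :=
  (pvLoopA s.toList 0 PySem.Set.empty).map String.mk

-- ===== PORT B =====
-- return set(sorted((t for t in tokens if t in s), key=s.find))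
def split_days_py_alt (s : String) : List String :=
  (PySem.Set.ofList
    (PySem.List.sorted (pvTokens.filter (fun t => PySem.Chars.isIn t s.toList))
      (fun t => PySem.Chars.find s.toList t))).map String.mk

-- ===== PRECONDITION & SPEC =====
def Spec_split_days_py (s : String) (out : List String) : Prop := out = split_days_py_alt s
instance (s : String) (out : List String) : Decidable (Spec_split_days_py s out) := by unfold Spec_split_days_py; infer_instance

-- ===== CLAIM (what is proved, stated in full; the proofs are below) =====
def Claim_equal_split_days_py : Prop := ∀ (s : String), Dom_split_days_py s → Spec_split_days_py s (split_days_py s)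

-- ===== LEMMAS AND PROOFS =====

-- the tokens matched at each successive position of the string, in scan order
def pvScan : List Char → List (List Char)
  | [] => []
  | c :: rest => ((pvMatch (c :: rest)).toList) ++ pvScan rest

-- pvMatch facts -------------------------------------------------------------

theorem pvStartswith_decide (l p : List Char) :
    PySem.Chars.startswith l p = decide (p <+: l) := by
  by_cases h : p <+: l
  · simp [h, (PySem.Chars.startswith_iff l p).mpr h]
  · simp [h]
    simpa using fun hc => h ((PySem.Chars.startswith_iff l p).mp hc)

theorem pvMatch_some {l t : List Char} (h : pvMatch l = some t) :
    t ∈ pvTokens ∧ t <+: l := by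
  refine ⟨List.mem_of_find?_eq_some h, ?_⟩
  have := List.find?_eq_some_iff_append.mp h
  exact (PySem.Chars.startswith_iff l t).mp this.1

theorem pvMatch_complete {l t : List Char} (ht : t ∈ pvTokens) (hp : t <+: l) :
    pvMatch l = some t := by
  fin_cases ht <;>
    · obtain ⟨r, rfl⟩ := hp
      simp [pvMatch, pvTokens, List.find?, pvStartswith_decide, List.cons_prefix_cons]

theorem pvMatch_head_none {c : Char} {r : List Char}
    (h : c ≠ 'T' ∧ c ≠ 'M' ∧ c ≠ 'W' ∧ c ≠ 'F') : pvMatch (c :: r) = none := by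
  obtain ⟨h1, h2, h3, h4⟩ := h
  simp [pvMatch, pvTokens, List.find?, pvStartswith_decide, List.cons_prefix_cons,
    Ne.symm h1, Ne.symm h2, Ne.symm h3, Ne.symm h4]

theorem pvMatch_none {l t : List Char} (h : pvMatch l = none) (ht : t ∈ pvTokens) :
    ¬ t <+: l := by
  intro hp
  simp [pvMatch_complete ht hp] at h

-- after a two-character match the next position matches nothing
theorem pvMatch_tail_none {l t : List Char} (h : pvMatch l = some t) (h2 : t.length = 2) :
    pvMatch l.tail = none := by
  obtain ⟨ht, hp⟩ := pvMatch_some h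
  fin_cases ht <;> simp at h2 <;> obtain ⟨r, rfl⟩ := hp <;>
    exact pvMatch_head_none (by decide)

-- loop = fold of Set.add over pvScan ----------------------------------------

theorem pvLoopA_eq_scan (cs : List Char) :
    ∀ i out, pvLoopA cs i out = (pvScan (cs.drop i)).foldl PySem.Set.add out := by
  intro i
  induction hn : cs.length - i using Nat.strong_induction_on generalizing i with
  | _ n ih =>
    intro out
    rw [pvLoopA]
    split
    · next hlt =>
      have hdrop : cs.drop i = cs[i] :: cs.drop (i + 1) := List.drop_eq_getElem_cons hlt
      rw [PySem.List.slice_from cs (by omega : (0:Int) ≤ (i : Int))]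
      simp only [Int.toNat_natCast]
      split
      · next hm =>
        rw [ih (cs.length - (i+1)) (by omega) (i+1) rfl]
        conv_rhs => rw [hdrop]
        simp [pvScan, hm]
      · next t hm =>
        obtain ⟨ht, hp⟩ := pvMatch_some hm
        have hlen : t.length = 1 ∨ t.length = 2 := by fin_cases ht <;> simp
        rcases hlen with h1 | h2
        · rw [h1, ih (cs.length - (i+1)) (by omega) (i+1) rfl]
          conv_rhs => rw [hdrop]
          simp [pvScan, hm]
        · -- two-character token: position i+1 matches nothing
          have hlen2 : i + 2 ≤ cs.length := by
            have := hp.length_le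
            simp [List.length_drop] at this
            omega
          rw [h2, ih (cs.length - (i+2)) (by omega) (i+2) rfl]
          have htail : pvMatch (cs.drop (i+1)) = none := by
            have h' := pvMatch_tail_none hm h2
            rwa [hdrop, List.tail_cons] at h'
          have hdrop2 : cs.drop (i+1) = cs[i+1] :: cs.drop (i + 2) := List.drop_eq_getElem_cons (by omega)
          conv_rhs => rw [hdrop]
          conv_rhs => rw [show pvScan (cs[i] :: cs.drop (i+1)) = (pvMatch (cs[i] :: cs.drop (i+1))).toList ++ pvScan (cs.drop (i+1)) from rfl]
          conv_rhs => rw [hdrop2]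
          simp [pvScan, hm, htail]
    · next hge =>
      rw [List.drop_eq_nil_of_le (by omega)]
      simp [pvScan]

-- pvScan membership ---------------------------------------------------------

theorem mem_pvScan_of_prefix_drop {t : List Char} (ht : t ∈ pvTokens) :
    ∀ (cs : List Char) (j : Nat), t <+: cs.drop j → t ∈ pvScan cs := by
  intro cs
  induction cs with
  | nil =>
    intro j hp
    simp at hp
    subst hp
    exact absurd ht (by decide)
  | cons c rest ih =>
    intro j hp
    cases j with
    | zero =>
      simp at hp
      rw [pvScan, pvMatch_complete ht hp]
      simp
    | succ j =>
      rw [List.drop_succ_cons] at hp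
      rw [pvScan]
      exact List.mem_append_right _ (ih j hp)

theorem mem_pvScan {cs t : List Char} :
    t ∈ pvScan cs ↔ t ∈ pvTokens ∧ t <:+: cs := by
  constructor
  · intro h
    induction cs with
    | nil => simp [pvScan] at h
    | cons c rest ih =>
      rw [pvScan] at h
      rcases List.mem_append.mp h with h1 | h2
      · cases hm : pvMatch (c :: rest) with
        | none => simp [hm] at h1
        | some u =>
          simp [hm] at h1
          subst h1
          obtain ⟨ht, hp⟩ := pvMatch_some hm
          exact ⟨ht, hp.isInfix⟩
      · obtain ⟨ht, hi⟩ := ih h2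
        exact ⟨ht, List.infix_cons hi⟩
  · rintro ⟨ht, hi⟩
    have : ∃ j, t <+: cs.drop j := by
      rw [PySem.Chars.exists_prefix_drop_iff_isIn, PySem.Chars.isIn_iff_infix]
      exact hi
    obtain ⟨j, hp⟩ := this
    exact mem_pvScan_of_prefix_drop ht cs j hp

-- find helper lemmas --------------------------------------------------------

theorem pvFind_eq_of_first {l t : List Char} {k : Nat}
    (hk : t <+: l.drop k) (hmin : ∀ i < k, ¬ t <+: l.drop i) :
    PySem.Chars.find l t = (k : Int) := by
  have hinf : t <:+: l := by
    rw [← PySem.Chars.isIn_iff_infix, ← PySem.Chars.exists_prefix_drop_iff_isIn]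
    exact ⟨k, hk⟩
  have hnn : 0 ≤ PySem.Chars.find l t := (PySem.Chars.find_nonneg_iff l t).mpr hinf
  obtain ⟨hpre, hmin'⟩ := PySem.Chars.find_spec hnn
  rcases Nat.lt_trichotomy (PySem.Chars.find l t).toNat k with h | h | h
  · exact absurd hpre (hmin _ h)
  · omega
  · exact absurd hk (hmin' k h)

theorem pvFind_zero {l t : List Char} (hp : t <+: l) : PySem.Chars.find l t = 0 := by
  exact pvFind_eq_of_first (k := 0) (by simpa) (by omega)

theorem pvFind_cons_succ {c : Char} {l t : List Char}
    (hnp : ¬ t <+: (c :: l)) (hi : t <:+: l) :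
    PySem.Chars.find (c :: l) t = PySem.Chars.find l t + 1 := by
  have hnn : 0 ≤ PySem.Chars.find l t := (PySem.Chars.find_nonneg_iff l t).mpr hi
  obtain ⟨hpre, hmin⟩ := PySem.Chars.find_spec hnn
  have : PySem.Chars.find (c :: l) t = ((PySem.Chars.find l t).toNat + 1 : Nat) := by
    apply pvFind_eq_of_first
    · simpa using hpre
    · intro i hilt
      cases i with
      | zero => simpa using hnp
      | succ j =>
        rw [List.drop_succ_cons]
        exact hmin j (by omega)
  omega

-- PySem.Set.ofList structure -----------------------------------------------

theorem pvFoldl_add_eq (l : List (List Char)) :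
    ∀ s : PySem.Set (List Char),
      l.foldl PySem.Set.add s = s ++ (l.foldl PySem.Set.add []).filter (fun y => !s.contains y) := by
  induction l with
  | nil => intro s; simp
  | cons x l ih =>
    intro s
    simp only [List.foldl_cons]
    rw [ih (PySem.Set.add s x), ih (PySem.Set.add [] x)]
    have hadd0 : PySem.Set.add ([] : PySem.Set (List Char)) x = [x] := by
      simp [PySem.Set.add, PySem.Set.contains]
    by_cases hx : x ∈ s
    · have hadds : PySem.Set.add s x = s := by
        simp [PySem.Set.add, PySem.Set.contains, List.contains_eq_mem, hx]
      rw [hadds, hadd0, List.filter_append]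
      have hxnil : [x].filter (fun y => !s.contains y) = [] := by
        simp [List.contains_eq_mem, hx]
      rw [hxnil, List.nil_append, List.filter_filter]
      congr 1
      apply List.filter_congr
      intro y _
      by_cases hsy : y ∈ s
      · simp [PySem.Set.contains, List.contains_eq_mem, hsy]
      · have hyx : y ≠ x := fun h => hsy (h ▸ hx)
        simp [PySem.Set.contains, List.contains_eq_mem, hsy, hyx]
    · have hadds : PySem.Set.add s x = s ++ [x] := by
        simp [PySem.Set.add, PySem.Set.contains, List.contains_eq_mem, hx]
      rw [hadds, hadd0, List.filter_append]
      have hxf : [x].filter (fun y => !s.contains y) = [x] := by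
        simp [List.contains_eq_mem, hx]
      rw [hxf, List.filter_filter, List.append_assoc]
      congr 2
      apply List.filter_congr
      intro y _
      by_cases hyx : y = x
      · subst hyx
        simp [PySem.Set.contains, List.contains_eq_mem, hx]
      · by_cases hsy : y ∈ s <;>
          simp [PySem.Set.contains, List.contains_eq_mem, hsy, hyx]

theorem pvOfList_cons (x : List Char) (l : List (List Char)) :
    PySem.Set.ofList (x :: l) = x :: (PySem.Set.ofList l).filter (fun y => y ≠ x) := by
  rw [PySem.Set.ofList_eq_foldl, PySem.Set.ofList_eq_foldl]
  simp only [List.foldl_cons]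
  have hadd0 : PySem.Set.add ([] : PySem.Set (List Char)) x = [x] := by
    simp [PySem.Set.add, PySem.Set.contains]
  rw [hadd0, pvFoldl_add_eq l [x]]
  simp only [List.cons_append, List.nil_append]
  congr 1
  apply List.filter_congr
  intro y _
  simp [List.contains_eq_mem]

theorem pvOfList_eq_self {l : List (List Char)} (h : l.Nodup) :
    PySem.Set.ofList l = l := by
  induction l with
  | nil => rfl
  | cons x l ih =>
    rw [pvOfList_cons, ih h.of_cons]
    have : l.filter (fun y => y ≠ x) = l := by
      apply List.filter_eq_self.mpr
      intro y hy
      simp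
      rintro rfl
      exact (List.nodup_cons.mp h).1 hy
    rw [this]

-- the first-occurrence dedup of pvScan is strictly increasing in find -------

theorem pvScan_pairwise (cs : List Char) :
    (PySem.Set.ofList (pvScan cs)).Pairwise
      (fun a b => PySem.Chars.find cs a < PySem.Chars.find cs b) := by
  induction cs with
  | nil => simp [pvScan, PySem.Set.ofList]
  | cons c rest ih =>
    have step : ∀ a ∈ pvScan rest, a ∈ pvTokens ∧ a <:+: rest := fun a ha => mem_pvScan.mp ha
    cases hm : pvMatch (c :: rest) with
    | none =>
      have hscan : pvScan (c :: rest) = pvScan rest := by rw [pvScan, hm]; simp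
      rw [hscan]
      refine ih.imp_of_mem ?_
      intro a b ha hb hab
      rw [PySem.Set.mem_ofList] at ha hb
      obtain ⟨hta, hia⟩ := step a ha
      obtain ⟨htb, hib⟩ := step b hb
      rw [pvFind_cons_succ (pvMatch_none hm hta) hia,
          pvFind_cons_succ (pvMatch_none hm htb) hib]
      omega
    | some t =>
      obtain ⟨ht, hp⟩ := pvMatch_some hm
      have hscan : pvScan (c :: rest) = t :: pvScan rest := by rw [pvScan, hm]; simp
      rw [hscan, pvOfList_cons]
      constructor
      · intro b hb
        simp only [List.mem_filter, decide_eq_true_eq] at hb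
        obtain ⟨hb, hbne⟩ := hb
        rw [PySem.Set.mem_ofList] at hb
        obtain ⟨htb, hib⟩ := step b hb
        have hbne' : b ≠ t := by simpa using hbne
        have hnp : ¬ b <+: (c :: rest) := by
          intro hbp
          have := pvMatch_complete htb hbp
          rw [hm] at this
          exact hbne' (Option.some_injective _ this.symm)
        rw [pvFind_zero hp, pvFind_cons_succ hnp hib]
        have : 0 ≤ PySem.Chars.find rest b := (PySem.Chars.find_nonneg_iff rest b).mpr hib
        omega
      · have hsub : ((PySem.Set.ofList (pvScan rest)).filter (fun y => y ≠ t)).Sublist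
            (PySem.Set.ofList (pvScan rest)) := List.filter_sublist
        refine (ih.sublist hsub).imp_of_mem ?_
        intro a b ha hb hab
        have ha' := (List.mem_filter.mp ha)
        have hb' := (List.mem_filter.mp hb)
        have hane : a ≠ t := by simpa using ha'.2
        have hbne : b ≠ t := by simpa using hb'.2
        rw [PySem.Set.mem_ofList] at ha' hb'
        obtain ⟨hta, hia⟩ := step a ha'.1
        obtain ⟨htb, hib⟩ := step b hb'.1
        have hnpa : ¬ a <+: (c :: rest) := by
          intro hap
          have := pvMatch_complete hta hap
          rw [hm] at this
          exact hane (Option.some_injective _ this.symm)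
        have hnpb : ¬ b <+: (c :: rest) := by
          intro hbp
          have := pvMatch_complete htb hbp
          rw [hm] at this
          exact hbne (Option.some_injective _ this.symm)
        rw [pvFind_cons_succ hnpa hia, pvFind_cons_succ hnpb hib]
        omega

-- assembly ------------------------------------------------------------------

theorem pvTokens_nodup : pvTokens.Nodup := by decide

theorem pvMain (cs : List Char) :
    PySem.Set.ofList (pvScan cs) =
      PySem.List.sorted (pvTokens.filter (fun t => PySem.Chars.isIn t cs))
        (fun t => PySem.Chars.find cs t) := by
  symm
  apply PySem.List.sorted_eq_of_perm_of_pairwise_lt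
  · rw [List.perm_ext_iff_of_nodup (PySem.Set.nodup_ofList _) (pvTokens_nodup.filter _)]
    intro a
    rw [PySem.Set.mem_ofList, mem_pvScan, List.mem_filter, PySem.Chars.isIn_iff_infix]
  · exact pvScan_pairwise cs

-- ===== VERDICT (by name: the statement is the Claim_ definition above) =====
theorem split_days_py_spec : Claim_equal_split_days_py := by
  intro s _
  unfold Spec_split_days_py split_days_py split_days_py_alt
  rw [pvLoopA_eq_scan s.toList 0 PySem.Set.empty, List.drop_zero,
    show PySem.Set.empty = ([] : PySem.Set (List Char)) from rfl,
    ← PySem.Set.ofList_eq_foldl, pvMain s.toList]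
  congr 1
  symm
  apply pvOfList_eq_self
  exact (PySem.List.sorted_perm _ _ _).nodup_iff.mpr (pvTokens_nodup.filter _)
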